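-- pv_equiv track=rewrite | github.com/pszemraj/parameter-golf | train_hconv.py | build_layer_schedule
-- ===== SOURCE A (Python) =====
-- def build_layer_schedule(
--     n_conv_effective: int, n_attn: int, n_unique_conv: int, dilated: bool = False
-- ) -> list[tuple[str, int, int]]:
--     """
--     Build the virtual layer schedule.
--     Returns list of (kind, module_idx, dilation).
--     Places attention layers at roughly even intervals through the conv stack.
--     """
--     schedule: list[tuple[str, int, int]] = []
--     if n_attn == 0:
--         for i in range(n_conv_effective):
--             dil = (2 ** (i // 2)) if dilated else 1
--             schedule.append(("conv", i % n_unique_conv, min(dil, 64)))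
--         return schedule
--
--     conv_per_section = n_conv_effective // (n_attn + 1)
--     remainder = n_conv_effective - conv_per_section * (n_attn + 1)
--     conv_pos = 0
--     for section in range(n_attn + 1):
--         n_in_section = conv_per_section + (1 if section < remainder else 0)
--         for _ in range(n_in_section):
--             dil = (2 ** (conv_pos // 2)) if dilated else 1
--             schedule.append(("conv", conv_pos % n_unique_conv, min(dil, 64)))
--             conv_pos += 1
--         if section < n_attn:
--             schedule.append(("attn", section, 1))
--     return schedule
-- ===== SOURCE B (Python) =====
-- def build_layer_schedule(
--     n_conv_effective: int, n_attn: int, n_unique_conv: int, dilated: bool = False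
-- ) -> list[tuple[str, int, int]]:
--     """Closed-form thresholds + one flat two-pointer merge over conv positions."""
--     sections = n_attn + 1
--     q, r = divmod(n_conv_effective, sections)
--     # thresholds[a] = number of convs that precede attention layer a
--     thresholds = [(a + 1) * q + min(a + 1, r) for a in range(n_attn)]
--     out: list[tuple[str, int, int]] = []
--     j = 0
--     for pos in range(n_conv_effective):
--         while j < n_attn and thresholds[j] <= pos:
--             out.append(("attn", j, 1))
--             j += 1
--         dil = 2 ** (pos // 2) if dilated else 1
--         out.append(("conv", pos % n_unique_conv, min(dil, 64)))
--     while j < n_attn: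
--         out.append(("attn", j, 1))
--         j += 1
--     return out
-- ===== Notes on version B (the rewrite author's own statement) =====
-- stated objective: alternative
-- what changed: Replaces the nested per-section loops (and the redundant n_attn==0 special branch) by closed-form cumulative attention thresholds (a+1)*q+min(a+1,r) merged with the conv stream in a single flat two-pointer pass over conv positions.
-- outside the precondition, e.g. on build_layer_schedule(3, -2, 2, False): A returns [], B returns [('conv', 0, 1), ('conv', 1, 1), ('conv', 0, 1)]
import Mathlib
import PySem

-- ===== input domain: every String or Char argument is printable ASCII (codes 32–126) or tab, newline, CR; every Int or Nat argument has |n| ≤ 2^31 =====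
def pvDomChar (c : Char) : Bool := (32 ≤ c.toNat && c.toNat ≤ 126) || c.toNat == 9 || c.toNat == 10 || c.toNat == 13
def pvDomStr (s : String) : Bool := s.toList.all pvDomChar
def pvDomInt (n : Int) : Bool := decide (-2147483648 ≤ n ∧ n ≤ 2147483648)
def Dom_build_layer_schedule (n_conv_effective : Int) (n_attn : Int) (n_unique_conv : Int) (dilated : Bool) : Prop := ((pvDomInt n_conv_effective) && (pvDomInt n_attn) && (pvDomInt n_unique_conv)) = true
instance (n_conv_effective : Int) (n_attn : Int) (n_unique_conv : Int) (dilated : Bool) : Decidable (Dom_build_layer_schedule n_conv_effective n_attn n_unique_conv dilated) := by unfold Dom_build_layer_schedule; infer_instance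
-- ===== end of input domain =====

-- B replaces the nested per-section loops (and the redundant n_attn==0 branch) by closed-form
-- cumulative attention thresholds merged with the conv stream in one flat two-pointer pass
-- (objective: alternative decomposition, same cost).

-- helper shared by both ports: the conv tuple both Pythons append (the identical expression
-- '("conv", pos % n_unique_conv, min(2 ** (pos // 2) if dilated else 1, 64))'; pos is a loop
-- counter ≥ 0 in both programs, so the Nat exponent is exact where it is reached).
def pyConvEntry (u : Int) (d : Bool) (pos : Int) : String × Int × Int :=
  ("conv", PySem.Int.mod pos u, min (if d then (2 : Int) ^ ((PySem.Int.floordiv pos 2).toNat) else 1) 64)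

-- ===== PORT A =====
def build_layer_schedule (n_conv_effective : Int) (n_attn : Int) (n_unique_conv : Int) (dilated : Bool) : List (String × Int × Int) :=
  if n_attn = 0 then
    (PySem.List.pyRange 0 n_conv_effective 1).foldl
      (fun sch i => sch ++ [pyConvEntry n_unique_conv dilated i]) []
  else
    let cps := PySem.Int.floordiv n_conv_effective (n_attn + 1)
    let rem := n_conv_effective - cps * (n_attn + 1)
    let res := (PySem.List.pyRange 0 (n_attn + 1) 1).foldl
      (fun (st : List (String × Int × Int) × Int) s =>
        let st2 := (PySem.List.pyRange 0 (cps + if s < rem then 1 else 0) 1).foldl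
          (fun (st : List (String × Int × Int) × Int) _ =>
            (st.1 ++ [pyConvEntry n_unique_conv dilated st.2], st.2 + 1)) st
        if s < n_attn then (st2.1 ++ [("attn", s, 1)], st2.2) else st2) ([], 0)
    res.1

-- ===== PORT B =====
-- the 'while j < n_attn and thresholds[j] <= pos' loop of Source B
def bWhile (th : List Int) (m : Int) (out : List (String × Int × Int)) (j pos : Int) : List (String × Int × Int) × Int :=
  if h : (decide (j < m) && ((PySem.List.pyGet? th j).any fun t => decide (t ≤ pos))) = true then
    bWhile th m (out ++ [("attn", j, 1)]) (j + 1) pos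
  else (out, j)
termination_by (m - j).toNat
decreasing_by simp at h; omega

-- the trailing 'while j < n_attn' loop of Source B
def bTail (m : Int) (out : List (String × Int × Int)) (j : Int) : List (String × Int × Int) :=
  if _ : j < m then bTail m (out ++ [("attn", j, 1)]) (j + 1) else out
termination_by (m - j).toNat
decreasing_by omega

-- divmod in Source B raises for n_attn = -1; Pre_ excludes that, the total floordiv/mod stand in
def build_layer_schedule_alt (n_conv_effective : Int) (n_attn : Int) (n_unique_conv : Int) (dilated : Bool) : List (String × Int × Int) :=
  let q := PySem.Int.floordiv n_conv_effective (n_attn + 1)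
  let r := PySem.Int.mod n_conv_effective (n_attn + 1)
  let th := (PySem.List.pyRange 0 n_attn 1).map (fun a => (a + 1) * q + min (a + 1) r)
  let st := (PySem.List.pyRange 0 n_conv_effective 1).foldl
    (fun (st : List (String × Int × Int) × Int) pos =>
      let st2 := bWhile th n_attn st.1 st.2 pos
      (st2.1 ++ [pyConvEntry n_unique_conv dilated pos], st2.2)) ([], 0)
  bTail n_attn st.1 st.2

-- ===== PRECONDITION & SPEC =====
-- Pre_ restricts to the natural domain 0 ≤ n_attn (A raises ZeroDivisionError at n_attn = -1,
-- and for n_attn ≤ -2 returns [] only because its loops happen to be empty — a negative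
-- attention count is outside the function's purpose), and excludes n_unique_conv = 0 whenever
-- a conv layer is emitted (A raises ZeroDivisionError on '%').
def Pre_build_layer_schedule (n_conv_effective : Int) (n_attn : Int) (n_unique_conv : Int) (dilated : Bool) : Prop :=
  0 ≤ n_attn ∧ (n_unique_conv ≠ 0 ∨ n_conv_effective ≤ 0)
instance (n_conv_effective : Int) (n_attn : Int) (n_unique_conv : Int) (dilated : Bool) : Decidable (Pre_build_layer_schedule n_conv_effective n_attn n_unique_conv dilated) := by unfold Pre_build_layer_schedule; infer_instance

def pvWitness_build_layer_schedule : Int × Int × Int × Bool := (7, 2, 3, true)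

def Spec_build_layer_schedule (n_conv_effective : Int) (n_attn : Int) (n_unique_conv : Int) (dilated : Bool) (out : List (String × Int × Int)) : Prop := out = build_layer_schedule_alt n_conv_effective n_attn n_unique_conv dilated
instance (n_conv_effective : Int) (n_attn : Int) (n_unique_conv : Int) (dilated : Bool) (out : List (String × Int × Int)) : Decidable (Spec_build_layer_schedule n_conv_effective n_attn n_unique_conv dilated out) := by unfold Spec_build_layer_schedule; infer_instance

-- ===== CLAIM (what is proved, stated in full; the proofs are below) =====
def Claim_equal_build_layer_schedule : Prop := ∀ (n_conv_effective : Int) (n_attn : Int) (n_unique_conv : Int) (dilated : Bool), Dom_build_layer_schedule n_conv_effective n_attn n_unique_conv dilated → Pre_build_layer_schedule n_conv_effective n_attn n_unique_conv dilated → Spec_build_layer_schedule n_conv_effective n_attn n_unique_conv dilated (build_layer_schedule n_conv_effective n_attn n_unique_conv dilated)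

-- ===== LEMMAS AND PROOFS =====

-- named forms of the two fold bodies (definitionally equal to the inline lambdas of the ports)
def innerStep (u : Int) (d : Bool) : List (String × Int × Int) × Int → Int → List (String × Int × Int) × Int :=
  fun st _ => (st.1 ++ [pyConvEntry u d st.2], st.2 + 1)

def outerStep (u : Int) (d : Bool) (q rem m : Int) : List (String × Int × Int) × Int → Int → List (String × Int × Int) × Int :=
  fun st s =>
    let st2 := (PySem.List.pyRange 0 (q + if s < rem then 1 else 0) 1).foldl (innerStep u d) st
    if s < m then (st2.1 ++ [("attn", s, 1)], st2.2) else st2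

def thList (q r m : Int) : List Int :=
  (PySem.List.pyRange 0 m 1).map (fun a => (a + 1) * q + min (a + 1) r)

def stepB (u : Int) (d : Bool) (th : List Int) (m : Int) : List (String × Int × Int) × Int → Int → List (String × Int × Int) × Int :=
  fun st pos =>
    let st2 := bWhile th m st.1 st.2 pos
    (st2.1 ++ [pyConvEntry u d pos], st2.2)

-- cumulative number of convs before section s (cum q r s = s*q + min s r)
def cum (q r s : Int) : Int := s * q + min s r

def convRun (u : Int) (d : Bool) (pos : Int) (k : Nat) : List (String × Int × Int) :=
  (List.range k).map (fun j : Nat => pyConvEntry u d (pos + (j : Int)))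

-- the common section-structured normal form of both programs
def AForm (u : Int) (d : Bool) (q r m : Int) (s : Int) : List (String × Int × Int) :=
  if _ : s < m then
    convRun u d (cum q r s) (cum q r (s + 1) - cum q r s).toNat ++ ("attn", s, 1) :: AForm u d q r m (s + 1)
  else
    convRun u d (cum q r s) (cum q r (s + 1) - cum q r s).toNat
termination_by (m - s).toNat
decreasing_by omega

theorem cum_succ_sub (q r s : Int) : cum q r (s + 1) - cum q r s = q + (if s < r then 1 else 0) := by
  unfold cum
  rcases lt_or_ge s r with h | h
  · rw [min_eq_left (by omega : s ≤ r), min_eq_left (by omega : s + 1 ≤ r), if_pos h]; ring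
  · rw [min_eq_right (by omega : r ≤ s), min_eq_right (by omega : r ≤ s + 1), if_neg (by omega)]; ring

theorem convRun_succ (u : Int) (d : Bool) (pos : Int) (k : Nat) :
    convRun u d pos (k + 1) = pyConvEntry u d pos :: convRun u d (pos + 1) k := by
  unfold convRun
  rw [List.range_succ_eq_map, List.map_cons, List.map_map]
  congr 1
  · norm_num
  · refine List.map_congr_left fun j _ => ?_
    show pyConvEntry u d (pos + ((Nat.succ j : Nat) : Int)) = pyConvEntry u d (pos + 1 + (j : Int))
    congr 1
    push_cast
    ring

theorem A_inner_go (u : Int) (d : Bool) (l : List Int) :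
    ∀ (acc : List (String × Int × Int)) (pos : Int),
    l.foldl (innerStep u d) (acc, pos) = (acc ++ convRun u d pos l.length, pos + (l.length : Int)) := by
  induction l with
  | nil => intro acc pos; simp [convRun]
  | cons x l ih =>
    intro acc pos
    simp only [List.foldl_cons, innerStep]
    rw [ih]
    rw [List.length_cons, convRun_succ]
    refine Prod.ext ?_ ?_
    · show (acc ++ [pyConvEntry u d pos]) ++ convRun u d (pos + 1) l.length
          = acc ++ pyConvEntry u d pos :: convRun u d (pos + 1) l.length
      simp
    · show pos + 1 + (l.length : Int) = pos + ((l.length + 1 : Nat) : Int)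
      push_cast
      ring

theorem A_inner (u : Int) (d : Bool) (k : Int) (acc : List (String × Int × Int)) (pos : Int) :
    (PySem.List.pyRange 0 k 1).foldl (innerStep u d) (acc, pos)
      = (acc ++ convRun u d pos k.toNat, pos + (k.toNat : Int)) := by
  rw [A_inner_go]
  simp [PySem.List.length_pyRange_one]

theorem bWhile_stop_ge (th : List Int) (m : Int) (out : List (String × Int × Int)) (j pos : Int)
    (h : m ≤ j) : bWhile th m out j pos = (out, j) := by
  rw [bWhile, dif_neg]
  simp only [Bool.and_eq_true, decide_eq_true_eq, not_and]
  intro h1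
  omega

theorem th_get (q r m j : Int) (h0 : 0 ≤ j) (h1 : j < m) :
    PySem.List.pyGet? (thList q r m) j = some ((j + 1) * q + min (j + 1) r) := by
  unfold thList
  rw [PySem.List.pyGet?_of_nonneg _ h0]
  rw [List.getElem?_map, PySem.List.getElem?_pyRange_one]
  rw [if_pos (by omega)]
  simp only [Option.map_some]
  have hj : ((j.toNat : Int)) = j := by omega
  simp [hj]

theorem bWhile_stop_lt (q r m : Int) (out : List (String × Int × Int)) (j pos : Int)
    (h0 : 0 ≤ j) (h1 : j < m) (h2 : pos < cum q r (j + 1)) :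
    bWhile (thList q r m) m out j pos = (out, j) := by
  rw [bWhile, dif_neg]
  rw [th_get q r m j h0 h1]
  simp only [Bool.and_eq_true, decide_eq_true_eq, Option.any_some, not_and]
  intro _
  unfold cum at h2
  omega

theorem bWhile_fire (q r m : Int) (out : List (String × Int × Int)) (j pos : Int)
    (h0 : 0 ≤ j) (h1 : j < m) (h2 : cum q r (j + 1) ≤ pos) :
    bWhile (thList q r m) m out j pos
      = bWhile (thList q r m) m (out ++ [("attn", j, 1)]) (j + 1) pos := by
  conv_lhs => rw [bWhile]
  rw [dif_pos]
  rw [th_get q r m j h0 h1]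
  simp only [Bool.and_eq_true, decide_eq_true_eq, Option.any_some]
  unfold cum at h2
  exact ⟨h1, by omega⟩

theorem bTail_stop (m : Int) (out : List (String × Int × Int)) (j : Int) (h : m ≤ j) :
    bTail m out j = out := by
  rw [bTail, dif_neg (by omega)]

theorem bTail_step (m : Int) (out : List (String × Int × Int)) (j : Int) (h : j < m) :
    bTail m out j = bTail m (out ++ [("attn", j, 1)]) (j + 1) := by
  conv_lhs => rw [bTail]
  rw [dif_pos h]

def wrapB (m : Int) (st : List (String × Int × Int) × Int) : List (String × Int × Int) :=
  bTail m st.1 st.2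

theorem cum_mono (q r : Int) (hq : 0 ≤ q) {a b : Int} (hab : a ≤ b) :
    cum q r a ≤ cum q r b := by
  unfold cum
  have h1 : 0 ≤ (b - a) * q := mul_nonneg (by omega) hq
  have h2 : min a r ≤ min b r := min_le_min hab (le_refl r)
  nlinarith

theorem B_chunk (u : Int) (d : Bool) (q r m : Int) :
    ∀ (kk : Nat) (c : Int) (out : List (String × Int × Int)) (s : Int), 0 ≤ s →
    (s = m ∨ (s < m ∧ c + (kk : Int) ≤ cum q r (s + 1))) →
    (PySem.List.pyRange c (c + (kk : Int)) 1).foldl (stepB u d (thList q r m) m) (out, s)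
      = (out ++ convRun u d c kk, s) := by
  intro kk
  induction kk with
  | zero => intro c out s _ _; simp [convRun]
  | succ k ih =>
    intro c out s h0 hcase
    rw [PySem.List.pyRange_one_cons (by push_cast; omega : c < c + ((k + 1 : Nat) : Int))]
    simp only [List.foldl_cons]
    have hstep : stepB u d (thList q r m) m (out, s) c = (out ++ [pyConvEntry u d c], s) := by
      unfold stepB
      rcases hcase with he | ⟨hlt, hle⟩
      · rw [bWhile_stop_ge _ _ _ _ _ (by omega)]
      · rw [bWhile_stop_lt q r m out s c h0 hlt (by push_cast at hle; omega)]
    rw [hstep]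
    have hrng : c + ((k + 1 : Nat) : Int) = (c + 1) + (k : Int) := by push_cast; ring
    rw [hrng]
    have horc : s = m ∨ (s < m ∧ (c + 1) + (k : Int) ≤ cum q r (s + 1)) := by
      rcases hcase with he | ⟨hlt, hle⟩
      · exact Or.inl he
      · refine Or.inr ⟨hlt, ?_⟩
        push_cast at hle
        omega
    rw [ih (c + 1) (out ++ [pyConvEntry u d c]) s h0 horc]
    rw [convRun_succ]
    simp

theorem B_shift (u : Int) (d : Bool) (q r m n : Int) (out : List (String × Int × Int)) (s : Int)
    (h0 : 0 ≤ s) (h1 : s < m) (h2 : cum q r (s + 1) ≤ n) :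
    wrapB m ((PySem.List.pyRange (cum q r (s + 1)) n 1).foldl (stepB u d (thList q r m) m) (out, s))
      = wrapB m ((PySem.List.pyRange (cum q r (s + 1)) n 1).foldl (stepB u d (thList q r m) m)
          (out ++ [("attn", s, 1)], s + 1)) := by
  rcases eq_or_lt_of_le h2 with he | hl
  · rw [PySem.List.pyRange_one_eq_nil (by omega : n ≤ cum q r (s + 1))]
    simp only [List.foldl_nil, wrapB]
    exact bTail_step m out s h1
  · rw [PySem.List.pyRange_one_cons hl]
    simp only [List.foldl_cons]
    have : stepB u d (thList q r m) m (out, s) (cum q r (s + 1))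
        = stepB u d (thList q r m) m (out ++ [("attn", s, 1)], s + 1) (cum q r (s + 1)) := by
      unfold stepB
      rw [bWhile_fire q r m out s (cum q r (s + 1)) h0 h1 (le_refl _)]
    rw [this]

theorem B_main (u : Int) (d : Bool) (q r m n : Int) (hq : 0 ≤ q) (htop : cum q r (m + 1) = n) :
    ∀ (cnt : Nat) (s : Int) (out : List (String × Int × Int)),
    (m - s).toNat = cnt → 0 ≤ s → s ≤ m →
    wrapB m ((PySem.List.pyRange (cum q r s) n 1).foldl (stepB u d (thList q r m) m) (out, s))
      = out ++ AForm u d q r m s := by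
  intro cnt
  induction cnt with
  | zero =>
    intro s out hcnt h0 h1
    have hs : s = m := by omega
    subst hs
    have hle : cum q r s ≤ cum q r (s + 1) := cum_mono q r hq (by omega)
    have hn : n = cum q r s + ((cum q r (s + 1) - cum q r s).toNat : Int) := by omega
    rw [hn]
    rw [B_chunk u d q r s _ _ out s h0 (Or.inl rfl)]
    rw [wrapB, bTail_stop _ _ _ (le_refl s)]
    rw [AForm, dif_neg (lt_irrefl s)]
  | succ k ih =>
    intro s out hcnt h0 h1
    have hsm : s < m := by omega
    have hle : cum q r s ≤ cum q r (s + 1) := cum_mono q r hq (by omega)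
    have hle2 : cum q r (s + 1) ≤ n := htop ▸ cum_mono q r hq (by omega)
    rw [PySem.List.pyRange_one_append (cum q r s) (cum q r (s + 1)) n hle hle2]
    rw [List.foldl_append]
    have hsplit : cum q r (s + 1) = cum q r s + ((cum q r (s + 1) - cum q r s).toNat : Int) := by omega
    rw [hsplit]
    rw [B_chunk u d q r m _ _ out s h0 (Or.inr ⟨hsm, by omega⟩)]
    rw [← hsplit]
    rw [B_shift u d q r m n _ s h0 hsm hle2]
    rw [ih (s + 1) _ (by omega) (by omega) (by omega)]
    conv_rhs => rw [AForm]
    rw [dif_pos hsm]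
    simp

theorem A_outer (u : Int) (d : Bool) (q r m : Int) (hq : 0 ≤ q) :
    ∀ (cnt : Nat) (s : Int) (acc : List (String × Int × Int)),
    (m - s).toNat = cnt → 0 ≤ s → s ≤ m →
    ((PySem.List.pyRange s (m + 1) 1).foldl (outerStep u d q r m) (acc, cum q r s)).1
      = acc ++ AForm u d q r m s := by
  intro cnt
  induction cnt with
  | zero =>
    intro s acc hcnt h0 h1
    have hs : s = m := by omega
    subst hs
    rw [PySem.List.pyRange_one_singleton]
    simp only [List.foldl_cons, List.foldl_nil]
    show ((outerStep u d q r s) (acc, cum q r s) s).1 = _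
    unfold outerStep
    rw [A_inner]
    rw [if_neg (lt_irrefl s)]
    rw [AForm, dif_neg (lt_irrefl s)]
    rw [cum_succ_sub]
  | succ k ih =>
    intro s acc hcnt h0 h1
    have hsm : s < m := by omega
    rw [PySem.List.pyRange_one_cons (by omega : s < m + 1)]
    simp only [List.foldl_cons]
    have hsz : 0 ≤ q + (if s < r then 1 else 0) := by split_ifs <;> omega
    have hstep : (outerStep u d q r m) (acc, cum q r s) s
        = (acc ++ convRun u d (cum q r s) (cum q r (s + 1) - cum q r s).toNat ++ [("attn", s, 1)], cum q r (s + 1)) := by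
      unfold outerStep
      rw [A_inner]
      rw [if_pos hsm]
      rw [cum_succ_sub]
      refine Prod.ext rfl ?_
      show cum q r s + ((q + (if s < r then 1 else 0)).toNat : Int) = cum q r (s + 1)
      have := cum_succ_sub q r s
      omega
    rw [hstep]
    rw [ih (s + 1) _ (by omega) (by omega) (by omega)]
    conv_rhs => rw [AForm]
    rw [dif_pos hsm]
    simp

theorem A_neg (u : Int) (d : Bool) (q rem m : Int) (hqneg : q ≤ -1) :
    ∀ (cnt : Nat) (s : Int) (acc : List (String × Int × Int)) (pos : Int),
    ((m + 1) - s).toNat = cnt → s ≤ m + 1 →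
    ((PySem.List.pyRange s (m + 1) 1).foldl (outerStep u d q rem m) (acc, pos)).1
      = bTail m acc s := by
  intro cnt
  induction cnt with
  | zero =>
    intro s acc pos hcnt h1
    have hs : s = m + 1 := by omega
    subst hs
    rw [PySem.List.pyRange_one_eq_nil (le_refl _)]
    simp only [List.foldl_nil]
    rw [bTail_stop _ _ _ (by omega)]
  | succ k ih =>
    intro s acc pos hcnt h1
    have hsm : s < m + 1 := by omega
    rw [PySem.List.pyRange_one_cons hsm]
    simp only [List.foldl_cons]
    have hempty : PySem.List.pyRange 0 (q + if s < rem then 1 else 0) 1 = [] :=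
      PySem.List.pyRange_one_eq_nil (by split_ifs <;> omega)
    by_cases hlt : s < m
    · have hstep : (outerStep u d q rem m) (acc, pos) s = (acc ++ [("attn", s, 1)], pos) := by
        unfold outerStep
        rw [hempty]
        simp only [List.foldl_nil]
        rw [if_pos hlt]
      rw [hstep, ih (s + 1) _ pos (by omega) (by omega)]
      exact (bTail_step m acc s hlt).symm
    · have hs : s = m := by omega
      have hstep : (outerStep u d q rem m) (acc, pos) s = (acc, pos) := by
        unfold outerStep
        rw [hempty]
        simp only [List.foldl_nil]
        rw [if_neg hlt]
      rw [hstep, ih (s + 1) _ pos (by omega) (by omega)]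
      subst hs
      rw [bTail_stop _ _ _ (by omega), bTail_stop _ _ _ (by omega)]

theorem A_bridge (n m u : Int) (d : Bool) (hm : m ≠ 0) :
    build_layer_schedule n m u d
      = ((PySem.List.pyRange 0 (m + 1) 1).foldl
          (outerStep u d (PySem.Int.floordiv n (m + 1))
            (n - PySem.Int.floordiv n (m + 1) * (m + 1)) m) ([], 0)).1 := by
  unfold build_layer_schedule
  rw [if_neg hm]
  unfold outerStep innerStep
  rfl

theorem B_bridge (n m u : Int) (d : Bool) :
    build_layer_schedule_alt n m u d
      = wrapB m ((PySem.List.pyRange 0 n 1).foldl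
          (stepB u d (thList (PySem.Int.floordiv n (m + 1)) (PySem.Int.mod n (m + 1)) m) m) ([], 0)) := by
  unfold build_layer_schedule_alt wrapB stepB thList
  rfl

-- ===== VERDICT (by name: the statement is the Claim_ definition above) =====
theorem build_layer_schedule_spec : Claim_equal_build_layer_schedule := by
  intro n m u d _ hpre
  obtain ⟨hm, _⟩ := hpre
  unfold Spec_build_layer_schedule
  set q := PySem.Int.floordiv n (m + 1) with hqdef
  set r := PySem.Int.mod n (m + 1) with hrdef
  have hb : (0 : Int) < m + 1 := by omega
  have hid : q * (m + 1) + r = n := PySem.Int.floordiv_mul_add_mod n (m + 1)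
  have hr0 : 0 ≤ r := PySem.Int.mod_nonneg n hb
  have hrm : r < m + 1 := PySem.Int.mod_lt n hb
  have hcum0 : cum q r 0 = 0 := by unfold cum; rw [min_eq_left hr0]; ring
  by_cases hn : 0 ≤ n
  · have hq : 0 ≤ q := by
      by_contra hc
      push_neg at hc
      have h1 : q ≤ -1 := by omega
      nlinarith
    have htop : cum q r (m + 1) = n := by
      unfold cum
      rw [min_eq_right (by omega : r ≤ m + 1)]
      linarith
    have hB : build_layer_schedule_alt n m u d = [] ++ AForm u d q r m 0 := by
      rw [B_bridge]
      have := B_main u d q r m n hq htop (m - 0).toNat 0 [] rfl (le_refl 0) hm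
      rw [hcum0] at this
      exact this
    by_cases hm0 : m = 0
    · subst hm0
      have hr : r = 0 := by omega
      have hqn : q = n := by nlinarith
      unfold build_layer_schedule
      rw [if_pos rfl]
      rw [PySem.List.foldl_append_singleton_eq_map (pyConvEntry u d)]
      rw [hB]
      rw [AForm, dif_neg (lt_irrefl 0)]
      have hsz : cum q r (0 + 1) - cum q r 0 = n := by
        rw [cum_succ_sub, hr, hqn]
        simp
      rw [hsz, hcum0]
      unfold convRun
      rw [PySem.List.pyRange_one]
      rw [List.map_map]
      simp only [List.nil_append, sub_zero, zero_add, Function.comp_def]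
    · have hA : build_layer_schedule n m u d = [] ++ AForm u d q r m 0 := by
        rw [A_bridge n m u d hm0]
        have hrm' : n - q * (m + 1) = r := by linarith
        rw [hrm']
        have := A_outer u d q r m hq (m - 0).toNat 0 [] rfl (le_refl 0) hm
        rw [hcum0] at this
        exact this
      rw [hA, hB]
  · push_neg at hn
    have hqneg : q ≤ -1 := by
      by_contra hc
      push_neg at hc
      have h1 : 0 ≤ q := by omega
      nlinarith
    have hB : build_layer_schedule_alt n m u d = bTail m [] 0 := by
      rw [B_bridge]
      rw [PySem.List.pyRange_one_eq_nil (by omega : n ≤ 0)]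
      rfl
    by_cases hm0 : m = 0
    · unfold build_layer_schedule
      rw [if_pos hm0]
      rw [PySem.List.pyRange_one_eq_nil (by omega : n ≤ 0)]
      rw [hB, hm0, bTail_stop _ _ _ (le_refl 0)]
      rfl
    · have hA : build_layer_schedule n m u d = bTail m [] 0 := by
        rw [A_bridge n m u d hm0]
        exact A_neg u d q (n - q * (m + 1)) m hqneg ((m + 1) - 0).toNat 0 [] 0 rfl (by omega)
      rw [hA, hB]
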